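-- pv_equiv track=rewrite | github.com/Rhaegal222/Unical | Primo Anno/Fondamenti di Programmazione 1/Esercizi/Old/domjudge/R4.py | ricorsiva
-- ===== SOURCE A (Python) =====
-- def ricorsiva(lista, N, X, C, i):
--     if i >= N and C == 0:
--         return 0
--
--     if i >= N:
--         return C + ricorsiva(lista, N, C, 0, 0)
--
--     if X == lista[i]:
--         lista[i] = 0
--         return ricorsiva(lista, N, X, C+1, i+1)
--
--     return ricorsiva(lista, N, X, C, i+1)
-- ===== SOURCE B (Python) =====
-- from collections import Counter
--
--
-- def ricorsiva(lista, N, X, C, i):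
--     if i >= N and C == 0:
--         return 0
--     if i < N:
--         # finish the current pass: zero out the X's in lista[i:N]
--         for j in range(i, N):
--             if lista[j] == X:
--                 lista[j] = 0
--                 C += 1
--         if C == 0:
--             return 0
--     # chain of targets t <- count(t): each later pass of A only zeroes its own
--     # (nonzero) target, so one Counter built once replaces all repeated scans.
--     cnt = Counter(lista[:max(N, 0)])
--     total = C
--     t = C
--     while True:
--         c = cnt.pop(t, 0)
--         if c == 0:
--             return total
--         total += c
--         t = c
-- ===== Notes on version B (the rewrite author's own statement) =====
-- stated objective: faster
-- what changed: A re-scans the whole first N elements once per chained target (recursively, zeroing matches each pass); B finishes the current pass iteratively, then builds one Counter of lista[:N] and follows the target chain t <- count[t] by popping buckets, so every later pass becomes a single dict lookup.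
import Mathlib
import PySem

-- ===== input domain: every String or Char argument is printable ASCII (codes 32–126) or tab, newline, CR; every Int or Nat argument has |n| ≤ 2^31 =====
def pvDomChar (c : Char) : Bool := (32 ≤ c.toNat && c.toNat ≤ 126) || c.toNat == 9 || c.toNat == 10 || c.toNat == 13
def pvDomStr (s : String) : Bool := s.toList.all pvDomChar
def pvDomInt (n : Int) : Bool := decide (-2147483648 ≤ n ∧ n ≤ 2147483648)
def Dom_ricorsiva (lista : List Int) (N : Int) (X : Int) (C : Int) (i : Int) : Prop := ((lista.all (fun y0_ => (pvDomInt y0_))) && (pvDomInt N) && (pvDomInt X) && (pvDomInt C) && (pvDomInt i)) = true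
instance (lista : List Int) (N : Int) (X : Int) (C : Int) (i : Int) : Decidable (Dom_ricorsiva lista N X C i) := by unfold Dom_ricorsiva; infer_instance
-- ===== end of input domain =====

-- B replaces A's repeated full re-scans (one scan per chained target) by one Counter built
-- once; equivalence is about the RETURN value (A zeroes matched elements in place, B only
-- performs the first pass's zeroing).

-- ===== PORT A =====
-- helpers needed by the ports' termination proofs
def pvCountNZ (l : List Int) : Nat := l.countP (fun v => v != 0)

theorem pvCountNZ_set_zero (l : List Int) (k : Nat) :
    pvCountNZ (l.set k 0) ≤ pvCountNZ l ∧
    (∀ v, l[k]? = some v → v ≠ 0 → pvCountNZ (l.set k 0) < pvCountNZ l) := by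
  induction l generalizing k with
  | nil => simp [pvCountNZ]
  | cons x xs ih =>
    cases k with
    | zero =>
      constructor
      · simp [pvCountNZ, List.countP_cons]
      · intro v hv hne
        simp at hv; subst hv
        simp [pvCountNZ, List.countP_cons, hne]
    | succ k =>
      have := ih k
      constructor
      · simp only [List.set, pvCountNZ, List.countP_cons]
        have := (ih k).1
        simp [pvCountNZ] at this ⊢; omega
      · intro v hv hne
        simp only [List.getElem?_cons_succ] at hv
        have := (ih k).2 v hv hne
        simp only [List.set, pvCountNZ, List.countP_cons]
        simp [pvCountNZ] at this ⊢; omega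

-- A's scan of lista[i:N] (one pass): counts and zeroes the X's; stops on IndexError
def passZero (l : List Int) (X : Int) (i : Int) (g : Nat) (C : Int) : Int × List Int :=
  match g with
  | 0 => (C, l)
  | Nat.succ g' =>
    match PySem.List.pyGet? l i with
    | none => (C, l)
    | some v =>
      if X = v then passZero (PySem.List.pySetD l i 0) X (i + 1) g' (C + 1)
      else passZero l X (i + 1) g' C

theorem passZero_mono (X : Int) : ∀ (g : Nat) (l : List Int) (i C : Int),
    C ≤ (passZero l X i g C).1 ∧
    pvCountNZ (passZero l X i g C).2 ≤ pvCountNZ l ∧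
    (X ≠ 0 → C < (passZero l X i g C).1 → pvCountNZ (passZero l X i g C).2 < pvCountNZ l) := by
  intro g
  induction g with
  | zero => intro l i C; simp [passZero]
  | succ g ih =>
    intro l i C
    rw [passZero]
    cases hg : PySem.List.pyGet? l i with
    | none => simp
    | some v =>
      simp only []
      by_cases hx : X = v
      · rw [if_pos hx]
        -- in-range set: l' = l.set k 0 with l[k] = v
        obtain ⟨k, hk, hget⟩ : ∃ k, PySem.List.pyIdx? l.length i = some k ∧ l[k]? = some v := by
          simp only [PySem.List.pyGet?, Option.bind_eq_some_iff] at hg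
          obtain ⟨k, h1, h2⟩ := hg; exact ⟨k, h1, h2⟩
        have hset : PySem.List.pySetD l i 0 = l.set k 0 := by
          simp [PySem.List.pySetD, PySem.List.pySet?, hk]
        have hcz := pvCountNZ_set_zero l k
        obtain ⟨h1, h2, _⟩ := ih (l.set k 0) (i + 1) (C + 1)
        rw [hset]
        refine ⟨by omega, by omega, ?_⟩
        intro h0 _
        have hlt : pvCountNZ (l.set k 0) < pvCountNZ l := hcz.2 v hget (hx ▸ h0)
        omega
      · rw [if_neg hx]
        exact ih l (i + 1) C

-- A's recursion once a pass has ended with count t ≠ 0 would restart at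
-- ricorsiva(lista, N, t, 0, 0): scan [0, N), then recurse on the new count.
def chainA (l : List Int) (N : Int) (t : Int) : Int :=
  let r := passZero l t 0 N.toNat 0
  if h : r.1 = 0 then 0 else r.1 + chainA r.2 N r.1
termination_by (pvCountNZ l, if t = 0 then 1 else 0)
decreasing_by
  have hm := passZero_mono t N.toNat l 0 0
  by_cases ht : t = 0
  · rcases lt_or_eq_of_le hm.2.1 with hlt | heq
    · exact Prod.Lex.left _ _ hlt
    · rw [heq]
      apply Prod.Lex.right
      rw [if_neg h, if_pos ht]
      omega
  · have h0 : (0 : Int) < (passZero l t 0 N.toNat 0).1 :=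
      lt_of_le_of_ne hm.1 (fun e => h e.symm)
    exact Prod.Lex.left _ _ (hm.2.2 ht h0)

def ricorsiva (lista : List Int) (N : Int) (X : Int) (C : Int) (i : Int) : Int :=
  if N ≤ i ∧ C = 0 then 0
  else if N ≤ i then C + chainA lista N C
  else
    let r := passZero lista X i (N - i).toNat C
    if r.1 = 0 then 0 else r.1 + chainA r.2 N r.1

-- ===== PORT B =====
theorem pvDict_size_erase_lt {ν : Type} (d : PySem.Dict Int ν) (t : Int) (c : ν)
    (h : PySem.Dict.get? d t = some c) : (PySem.Dict.erase d t).size < d.size := by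
  obtain ⟨p, hp, hpt⟩ : ∃ p ∈ d.items, (p.1 == t) = true := by
    simp only [PySem.Dict.get?, Option.map_eq_some_iff] at h
    obtain ⟨q, hq, _⟩ := h
    have hpq := List.find?_some hq
    exact ⟨q, List.mem_of_find?_eq_some hq, by simpa using hpq⟩
  have : (d.items.filter (fun p => !p.1 == t)).length < d.items.length := by
    apply List.length_filter_lt_length_iff_exists.2
    exact ⟨p, hp, by simp [hpt]⟩
  simpa [PySem.Dict.erase, PySem.Dict.size] using this

-- B's while loop: c = cnt.pop(t, 0) — read the bucket (default 0) and drop it — then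
-- stop on 0 or add c and follow the chain with t = c
def counterChain (cnt : PySem.Dict Int Int) (t : Int) (total : Int) : Int :=
  if h : PySem.Dict.getD cnt t 0 = 0 then total
  else counterChain (PySem.Dict.erase cnt t) (PySem.Dict.getD cnt t 0)
         (total + PySem.Dict.getD cnt t 0)
termination_by cnt.size
decreasing_by
  refine pvDict_size_erase_lt cnt t (PySem.Dict.getD cnt t 0) ?_
  cases hgg : PySem.Dict.get? cnt t with
  | none => exact absurd (by simp [PySem.Dict.getD, hgg]) h
  | some c0 => simp [PySem.Dict.getD, hgg]

def ricorsiva_alt (lista : List Int) (N : Int) (X : Int) (C : Int) (i : Int) : Int :=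
  if N ≤ i ∧ C = 0 then 0
  else
    let s : Int × List Int :=
      if i < N then
        (PySem.List.pyRange i N 1).foldl
          (fun (s : Int × List Int) j =>
            match PySem.List.pyGet? s.2 j with
            | none => s
            | some v => if v = X then (s.1 + 1, PySem.List.pySetD s.2 j 0) else s)
          (C, lista)
      else (C, lista)
    if i < N ∧ s.1 = 0 then 0
    else counterChain (PySem.Dict.counter (s.2.take (max N 0).toNat)) s.1 s.1

-- ===== PRECONDITION & SPEC =====
-- Pre_ is exactly the set of inputs on which the Python A returns normally: every index
-- the scans touch must be a valid Python index (A raises IndexError otherwise).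
def Pre_ricorsiva (lista : List Int) (N : Int) (X : Int) (C : Int) (i : Int) : Prop :=
  (N ≤ i → (C = 0 ∨ N ≤ (lista.length : Int))) ∧
  (i < N → (-(lista.length : Int) ≤ i ∧ N ≤ (lista.length : Int)))
instance (lista : List Int) (N : Int) (X : Int) (C : Int) (i : Int) : Decidable (Pre_ricorsiva lista N X C i) := by unfold Pre_ricorsiva; infer_instance

def pvWitness_ricorsiva : List Int × Int × Int × Int × Int := ([2, 1, 2], 3, 2, 0, 0)

def Spec_ricorsiva (lista : List Int) (N : Int) (X : Int) (C : Int) (i : Int) (out : Int) : Prop := out = ricorsiva_alt lista N X C i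
instance (lista : List Int) (N : Int) (X : Int) (C : Int) (i : Int) (out : Int) : Decidable (Spec_ricorsiva lista N X C i out) := by unfold Spec_ricorsiva; infer_instance

-- ===== CLAIM (what is proved, stated in full; the proofs are below) =====
def Claim_equal_ricorsiva : Prop := ∀ (lista : List Int) (N : Int) (X : Int) (C : Int) (i : Int), Dom_ricorsiva lista N X C i → Pre_ricorsiva lista N X C i → Spec_ricorsiva lista N X C i (ricorsiva lista N X C i)

-- ===== LEMMAS AND PROOFS =====

theorem passZero_length (X : Int) : ∀ (g : Nat) (l : List Int) (i C : Int),
    (passZero l X i g C).2.length = l.length := by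
  intro g
  induction g with
  | zero => intro l i C; simp [passZero]
  | succ g ih =>
    intro l i C
    rw [passZero]
    cases hg : PySem.List.pyGet? l i with
    | none => rfl
    | some v =>
      simp only []
      by_cases hx : X = v
      · rw [if_pos hx, ih]
        simp [PySem.List.pySetD, PySem.List.pySet?]
        cases PySem.List.pyIdx? l.length i <;> simp
      · simp only [if_neg hx]; exact ih l (i + 1) C

-- what one pass from index 0 computes: the count of t in l.take g, and t's zeroed out
theorem passZero_shift (t : Int) : ∀ (g : Nat) (x : Int) (xs : List Int) (n : Nat) (C : Int),
    passZero (x :: xs) t ((n : Int) + 1) g C =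
      ((passZero xs t (n : Int) g C).1, x :: (passZero xs t (n : Int) g C).2) := by
  intro g
  induction g with
  | zero => intro x xs n C; simp [passZero]
  | succ g ih =>
    intro x xs n C
    rw [passZero, passZero]
    rw [PySem.List.pyGet?_cons_succ]
    cases hg : PySem.List.pyGet? xs (n : Int) with
    | none => rfl
    | some v =>
      have hidx : ∃ k, PySem.List.pyIdx? xs.length (n : Int) = some k := by
        simp only [PySem.List.pyGet?, Option.bind_eq_some_iff] at hg
        obtain ⟨k, h1, _⟩ := hg; exact ⟨k, h1⟩
      obtain ⟨k, hk⟩ := hidx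
      have hkn : k = n := by
        simp only [PySem.List.pyIdx?] at hk
        split_ifs at hk <;> simp_all <;> omega
      subst hkn
      by_cases hx : t = v
      · simp only [if_pos hx]
        have hset : PySem.List.pySetD (x :: xs) ((k : Int) + 1) 0 = x :: PySem.List.pySetD xs (k : Int) 0 := by
          have : ((k : Int) + 1) = ((k + 1 : Nat) : Int) := by push_cast; ring
          rw [this]
          have hklen : k < xs.length := by
            by_contra hge
            have hnone : PySem.List.pyIdx? xs.length (k : Int) = none := by
              simp only [PySem.List.pyIdx?]
              rw [if_pos (by omega : (0 : Int) ≤ (k : Int)),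
                  if_neg (by omega : ¬ ((k : Int) < (xs.length : Int)))]
            rw [hnone] at hk
            exact absurd hk (by simp)
          simp [PySem.List.pySetD, PySem.List.pySet?, PySem.List.pyIdx?, hklen,
                show (0 : Int) ≤ (k : Int) + 1 by omega]
        rw [hset]
        have : ((k : Int) + 1) + 1 = ((k + 1 : Nat) : Int) + 1 := by push_cast; ring
        rw [this, ih]
        have : ((k + 1 : Nat) : Int) = (k : Int) + 1 := by push_cast; ring
        rw [this]
      · simp only [if_neg hx]
        have : ((k : Int) + 1) + 1 = ((k + 1 : Nat) : Int) + 1 := by push_cast; ring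
        rw [this, ih]
        have : ((k + 1 : Nat) : Int) = (k : Int) + 1 := by push_cast; ring
        rw [this]

def pvZero (t : Int) (xs : List Int) : List Int := xs.map (fun v => if t = v then 0 else v)

theorem passZero_zero_spec (t : Int) : ∀ (g : Nat) (l : List Int) (C : Int), g ≤ l.length →
    passZero l t 0 g C = (C + ((l.take g).count t : Int), pvZero t (l.take g) ++ l.drop g) := by
  intro g
  induction g with
  | zero => intro l C _; simp [passZero, pvZero]
  | succ g ih =>
    intro l C hg
    cases l with
    | nil => simp at hg
    | cons x xs =>
      rw [passZero]
      rw [PySem.List.pyGet?_zero_cons]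
      have hset : PySem.List.pySetD (x :: xs) 0 0 = 0 :: xs := by
        simp [PySem.List.pySetD, PySem.List.pySet?, PySem.List.pyIdx?]
      have hshift0 : ∀ (l' : List Int) (y : Int) (C' : Int),
          passZero (y :: l') t 1 g C' = ((passZero l' t 0 g C').1, y :: (passZero l' t 0 g C').2) := by
        intro l' y C'
        have h1 : (1 : Int) = ((0 : Nat) : Int) + 1 := by norm_num
        rw [h1, passZero_shift]
        norm_num
      simp only [List.length_cons, Nat.succ_le_succ_iff] at hg
      by_cases hx : t = x
      · simp only [if_pos hx]
        rw [hset]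
        simp only [zero_add]
        rw [hshift0, ih xs (C + 1) hg]
        subst hx
        simp [pvZero, List.count_cons]
        try ring
      · simp only [if_neg hx]
        simp only [zero_add]
        rw [hshift0, ih xs C hg]
        have hxb : (x == t) = false := by
          simp only [beq_eq_false_iff_ne, ne_eq]
          exact fun e => hx e.symm
        simp [pvZero, List.count_cons, hxb, if_neg hx]

-- counting facts about the zeroed-out list
theorem count_pvZero_self (t : Int) (ht : t ≠ 0) (xs : List Int) : (pvZero t xs).count t = 0 := by
  induction xs with
  | nil => rfl
  | cons x xs ih =>
    have hfx : ((if t = x then 0 else x) == t) = false := by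
      split_ifs with h
      · simp [Ne.symm ht]
      · simp only [beq_eq_false_iff_ne, ne_eq]
        exact fun e => h e.symm
    show ((if t = x then 0 else x) :: pvZero t xs).count t = 0
    rw [List.count_cons, ih, hfx]
    simp

theorem count_pvZero_ne (t s : Int) (hs : s ≠ 0) (hst : s ≠ t) (xs : List Int) :
    (pvZero t xs).count s = xs.count s := by
  induction xs with
  | nil => rfl
  | cons x xs ih =>
    have hfx : ((if t = x then 0 else x) == s) = (x == s) := by
      split_ifs with h
      · have h1 : (0 == s) = false := by simp [Ne.symm hs]
        have h2 : (x == s) = false := by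
          simp only [beq_eq_false_iff_ne, ne_eq]
          intro e; exact hst (h.trans e).symm
        rw [h1, h2]
      · rfl
    show ((if t = x then 0 else x) :: pvZero t xs).count s = (x :: xs).count s
    rw [List.count_cons, List.count_cons, ih, hfx]

theorem countNZ_pvZero (t : Int) (ht : t ≠ 0) (xs : List Int) :
    pvCountNZ (pvZero t xs) + xs.count t = pvCountNZ xs := by
  induction xs with
  | nil => rfl
  | cons x xs ih =>
    have step : pvCountNZ (pvZero t (x :: xs)) =
        pvCountNZ (pvZero t xs) + (if (if t = x then 0 else x) != 0 then 1 else 0) := by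
      show pvCountNZ ((if t = x then 0 else x) :: pvZero t xs) = _
      simp [pvCountNZ, List.countP_cons]
    rw [step, List.count_cons]
    by_cases h : t = x
    · have hb : (x == t) = true := by simp [h.symm]
      have hnz : ((if t = x then 0 else x) != 0) = false := by simp [h]
      have hx : (x != 0) = true := by simp [← h, ht]
      simp only [pvCountNZ, List.countP_cons] at *
      rw [hb, hnz, hx] at *
      simp at *
      omega
    · have hb : (x == t) = false := by
        simp only [beq_eq_false_iff_ne, ne_eq]; exact fun e => h e.symm
      have hnz : ((if t = x then 0 else x) != 0) = (x != 0) := by simp [h]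
      simp only [pvCountNZ, List.countP_cons] at *
      rw [hb, hnz] at *
      simp at *
      split <;> omega

-- Dict.erase lemmas
theorem pvGet?_erase_self {ν : Type} (d : PySem.Dict Int ν) (t : Int) :
    PySem.Dict.get? (PySem.Dict.erase d t) t = none := by
  simp only [PySem.Dict.get?, PySem.Dict.erase, Option.map_eq_none_iff]
  rw [List.find?_eq_none]
  intro p hp
  have := (List.mem_filter.1 hp).2
  simpa using this

theorem pvGet?_erase_of_ne {ν : Type} (d : PySem.Dict Int ν) (t s : Int) (h : s ≠ t) :
    PySem.Dict.get? (PySem.Dict.erase d t) s = PySem.Dict.get? d s := by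
  obtain ⟨items⟩ := d
  simp only [PySem.Dict.get?, PySem.Dict.erase]
  congr 1
  induction items with
  | nil => rfl
  | cons q ps ih =>
    by_cases hqt : q.1 = t
    · have h2 : (q.1 == s) = false := by
        simp only [beq_eq_false_iff_ne, ne_eq]
        intro e; exact h ((hqt.symm.trans e).symm)
      have h3 : (t == s) = false := by
        simp only [beq_eq_false_iff_ne, ne_eq]
        exact fun e => h e.symm
      simp [List.filter_cons, hqt, List.find?_cons, h2, h3, ih]
    · simp only [List.filter_cons]
      have hb : (!q.1 == t) = true := by simp [hqt]
      rw [hb, if_pos rfl]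
      simp only [List.find?_cons]
      cases hqs : (q.1 == s) with
      | true => rfl
      | false => exact ih

theorem pvGetD_erase (d : PySem.Dict Int Int) (t s : Int) :
    PySem.Dict.getD (PySem.Dict.erase d t) s 0 = if s = t then 0 else PySem.Dict.getD d s 0 := by
  split_ifs with h
  · subst h; simp [PySem.Dict.getD, pvGet?_erase_self]
  · simp [PySem.Dict.getD, pvGet?_erase_of_ne d t s h]

-- linearity of the while loop in its accumulator
theorem counterChain_add (a : Int) : ∀ (z : Nat) (cnt : PySem.Dict Int Int) (t total : Int),
    cnt.size ≤ z → counterChain cnt t (a + total) = a + counterChain cnt t total := by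
  intro z
  induction z with
  | zero =>
    intro cnt t total hz
    have hempty : cnt.items = [] := by
      cases h : cnt.items with
      | nil => rfl
      | cons p ps => simp [PySem.Dict.size, h] at hz
    have hgd : PySem.Dict.getD cnt t 0 = 0 := by
      simp [PySem.Dict.getD, PySem.Dict.get?, hempty]
    rw [counterChain, dif_pos hgd]
    conv_rhs => rw [counterChain]
    rw [dif_pos hgd]
  | succ z ih =>
    intro cnt t total hz
    by_cases hc : PySem.Dict.getD cnt t 0 = 0
    · rw [counterChain, dif_pos hc]
      conv_rhs => rw [counterChain]
      rw [dif_pos hc]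
    · rw [counterChain, dif_neg hc]
      conv_rhs => rw [counterChain]
      rw [dif_neg hc]
      have hg : PySem.Dict.get? cnt t = some (PySem.Dict.getD cnt t 0) := by
        cases hgg : PySem.Dict.get? cnt t with
        | none => exact absurd (by simp [PySem.Dict.getD, hgg]) hc
        | some c0 => simp [PySem.Dict.getD, hgg]
      have hsz := pvDict_size_erase_lt cnt t _ hg
      rw [show a + total + PySem.Dict.getD cnt t 0 = a + (total + PySem.Dict.getD cnt t 0) by ring]
      exact ih _ _ _ (by omega)

-- the heart: A's chained passes = B's counter walk
theorem chain_eq (N : Int) : ∀ (z : Nat) (l : List Int) (cnt : PySem.Dict Int Int) (t : Int),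
    pvCountNZ l ≤ z → t ≠ 0 → N.toNat ≤ l.length →
    (∀ s : Int, s ≠ 0 → PySem.Dict.getD cnt s 0 = ((l.take N.toNat).count s : Int)) →
    chainA l N t = counterChain cnt t 0 := by
  intro z
  induction z with
  | zero =>
    intro l cnt t hz ht hlen hinv
    -- countNZ l = 0: every element of l is 0, so the count of t (≠ 0) is 0 on both sides
    have hz0 : l.countP (fun v => v != 0) = 0 := by
      have : pvCountNZ l = 0 := Nat.le_zero.mp hz
      simpa [pvCountNZ] using this
    have hcnt : (l.take N.toNat).count t = 0 := by
      rw [List.count_eq_zero]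
      intro hmem
      have hv := List.mem_of_mem_take hmem
      have := List.countP_eq_zero.mp hz0 t hv
      simp [ht] at this
    have hpass := passZero_zero_spec t N.toNat l 0 hlen
    have hgd : PySem.Dict.getD cnt t 0 = 0 := by
      rw [hinv t ht, hcnt]; norm_num
    rw [chainA, counterChain, dif_pos hgd]
    simp [hpass, hcnt]
  | succ z ih =>
    intro l cnt t hz ht hlen hinv
    have hpass := passZero_zero_spec t N.toNat l 0 hlen
    set c : Nat := (l.take N.toNat).count t with hc
    by_cases hc0 : c = 0
    · have hgd : PySem.Dict.getD cnt t 0 = 0 := by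
        rw [hinv t ht, ← hc, hc0]; norm_num
      rw [chainA, counterChain, dif_pos hgd]
      simp [hpass, ← hc, hc0]
    · have hcne : ((c : Int)) ≠ 0 := by exact_mod_cast hc0
      have hgd : PySem.Dict.getD cnt t 0 = (c : Int) := by rw [hinv t ht, ← hc]
      rw [chainA, counterChain]
      simp only [hpass, ← hc, zero_add, hgd]
      rw [dif_neg hcne, dif_neg hcne]
      set l' : List Int := pvZero t (l.take N.toNat) ++ l.drop N.toNat with hl'
      have hlen' : l'.length = l.length := by
        simp [hl', pvZero]
        omega
      have htake : l'.take N.toNat = pvZero t (l.take N.toNat) := by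
        have hlz : (pvZero t (l.take N.toNat)).length = N.toNat := by
          simp [pvZero]; omega
        rw [hl']
        exact List.take_left' hlz
      have hnz : pvCountNZ l' ≤ z := by
        have h1 : pvCountNZ (pvZero t (l.take N.toNat)) + c = pvCountNZ (l.take N.toNat) := by
          rw [hc]; exact countNZ_pvZero t ht (l.take N.toNat)
        have h2 : pvCountNZ l = pvCountNZ (l.take N.toNat) + pvCountNZ (l.drop N.toNat) := by
          simp only [pvCountNZ]
          rw [← List.countP_append, List.take_append_drop]
        have h3 : pvCountNZ l' = pvCountNZ (pvZero t (l.take N.toNat)) + pvCountNZ (l.drop N.toNat) := by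
          simp [hl', pvCountNZ, List.countP_append]
        omega
      have hinv' : ∀ s : Int, s ≠ 0 →
          PySem.Dict.getD (PySem.Dict.erase cnt t) s 0 = ((l'.take N.toNat).count s : Int) := by
        intro s hs
        rw [htake, pvGetD_erase]
        split_ifs with hst
        · subst hst
          rw [count_pvZero_self s ht]
          norm_num
        · rw [count_pvZero_ne t s hs hst, hinv s hs]
      have hrec := ih l' (PySem.Dict.erase cnt t) (c : Int) hnz hcne (by omega) hinv'
      rw [hrec]
      have hca := counterChain_add (c : Int) (PySem.Dict.erase cnt t).size
        (PySem.Dict.erase cnt t) (c : Int) 0 (le_refl _)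
      rw [add_zero] at hca
      rw [hca]

-- phase 1: B's foldl over range(i, N) equals A's scan, when every index is valid
theorem pass_foldl_eq (X N : Int) : ∀ (g : Nat) (l : List Int) (i C : Int),
    g = (N - i).toNat → -(l.length : Int) ≤ i → N ≤ (l.length : Int) →
    (PySem.List.pyRange i N 1).foldl
      (fun (s : Int × List Int) j =>
        match PySem.List.pyGet? s.2 j with
        | none => s
        | some v => if v = X then (s.1 + 1, PySem.List.pySetD s.2 j 0) else s)
      (C, l) = passZero l X i g C := by
  intro g
  induction g with
  | zero =>
    intro l i C hg hlo hhi
    have : N ≤ i := by omega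
    rw [PySem.List.pyRange_one_eq_nil this]
    simp [passZero]
  | succ g ih =>
    intro l i C hg hlo hhi
    have hiN : i < N := by omega
    rw [PySem.List.pyRange_one_cons hiN, passZero]
    have hin : ∃ v, PySem.List.pyGet? l i = some v := by
      cases hgv : PySem.List.pyGet? l i with
      | none =>
        exfalso
        rw [PySem.List.pyGet?_eq_none_iff] at hgv
        exact hgv ⟨by omega, by omega⟩
      | some v => exact ⟨v, rfl⟩
    obtain ⟨v, hv⟩ := hin
    simp only [List.foldl_cons, hv]
    by_cases hx : X = v
    · have hvx : v = X := hx.symm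
      rw [if_pos hvx, if_pos hx]
      have hlen : (PySem.List.pySetD l i 0).length = l.length := by
        simp [PySem.List.pySetD, PySem.List.pySet?]
        cases PySem.List.pyIdx? l.length i <;> simp
      exact ih (PySem.List.pySetD l i 0) (i + 1) (C + 1) (by omega) (by omega) (by omega)
    · have hvx : ¬ (v = X) := fun h => hx h.symm
      rw [if_neg hvx, if_neg hx]
      exact ih l (i + 1) C (by omega) (by omega) hhi

-- ===== VERDICT (by name: the statement is the Claim_ definition above) =====
theorem ricorsiva_spec : Claim_equal_ricorsiva := by
  intro lista N X C i _ hpre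
  unfold Spec_ricorsiva
  unfold ricorsiva ricorsiva_alt
  obtain ⟨hge, hlt⟩ := hpre
  by_cases hni : N ≤ i
  · by_cases hC : C = 0
    · simp [hni, hC]
    · have hNlen : N ≤ (lista.length : Int) := (hge hni).resolve_left hC
      have hnot : ¬ (i < N) := by omega
      simp only [if_neg (by tauto : ¬ (N ≤ i ∧ C = 0)), if_pos hni, if_neg hnot,
        if_neg (by tauto : ¬ (i < N ∧ C = 0))]
      have hmax : (max N 0).toNat = N.toNat := by omega
      rw [hmax]
      have hce := chain_eq N (pvCountNZ lista) lista
        (PySem.Dict.counter (lista.take N.toNat)) C (le_refl _) hC (by omega)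
        (fun s _ => by rw [PySem.Dict.getD_counter])
      have hca := counterChain_add C (PySem.Dict.counter (lista.take N.toNat)).size
        (PySem.Dict.counter (lista.take N.toNat)) C 0 (le_refl _)
      rw [add_zero] at hca
      rw [hce, hca]
  · have hiN : i < N := by omega
    obtain ⟨hlo, hhi⟩ := hlt hiN
    have hfold := pass_foldl_eq X N (N - i).toNat lista i C rfl hlo hhi
    simp only [if_neg (by tauto : ¬ (N ≤ i ∧ C = 0)), if_neg hni, if_pos hiN]
    rw [hfold]
    set r := passZero lista X i (N - i).toNat C with hr
    by_cases hr1 : r.1 = 0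
    · simp [hr1, hiN]
    · simp only [if_neg hr1, if_neg (by tauto : ¬ (i < N ∧ r.1 = 0))]
      have hrlen : r.2.length = lista.length := by rw [hr]; exact passZero_length X _ _ _ _
      have hmax : (max N 0).toNat = N.toNat := by omega
      rw [hmax]
      have hce := chain_eq N (pvCountNZ r.2) r.2
        (PySem.Dict.counter (r.2.take N.toNat)) r.1 (le_refl _) hr1 (by omega)
        (fun s _ => by rw [PySem.Dict.getD_counter])
      have hca := counterChain_add r.1 (PySem.Dict.counter (r.2.take N.toNat)).size
        (PySem.Dict.counter (r.2.take N.toNat)) r.1 0 (le_refl _)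
      rw [add_zero] at hca
      rw [hce, hca]
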